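-- pv_equiv track=rewrite | github.com/LYXFOREVER/my_android_world | task_goal_gen/process_mctstree_util.py | find_index_of_third_duplicate_v2
-- ===== SOURCE A (Python) =====
-- def find_index_of_third_duplicate_v2(list_of_lists):
--     """
--     找到列表中重复出现第3次的元素，返回其索引。
--     如果没有找到重复3次的子列表，返回 -1。
--     """
--     seen = {}  # 用于记录每个子列表的出现次数
--     for index, current_list in enumerate(list_of_lists):
--         # 将当前子列表转换为不可变的元组（因为列表不能作为字典的键）
--         # 如果子列表中包含字典，需要将字典转换为元组
--         current_tuple = tuple(
--             tuple(sorted(item.items())) if isinstance(item, dict) else item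
--             for item in current_list
--         )
--
--         # 检查当前子列表是否与之前的子列表重复
--         if current_tuple in seen:
--             seen[current_tuple] += 1
--             # 如果某个子列表重复了2次，返回当前索引
--             if seen[current_tuple] == 3:
--                 return index
--         else:
--             seen[current_tuple] = 1
--     # 如果没有找到重复3次的子列表，返回 -1
--     return -1
-- ===== SOURCE B (Python) =====
-- def find_index_of_third_duplicate_v2(list_of_lists):
--     # Build a full index table key -> list of occurrence indices, then answer
--     # the question as a query: the minimum third-occurrence index, or -1.
--     positions = {}
--     for index, current_list in enumerate(list_of_lists):
--         key = tuple(
--             tuple(sorted(item.items())) if isinstance(item, dict) else item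
--             for item in current_list
--         )
--         positions.setdefault(key, []).append(index)
--     cands = [idx[2] for idx in positions.values() if len(idx) >= 3]
--     return min(cands) if cands else -1
-- ===== Notes on version B (the rewrite author's own statement) =====
-- stated objective: alternative
-- what changed: A counts occurrences in a dict and returns early the moment a key reaches count 3; B first builds a complete key -> occurrence-index table in one pass and afterwards answers the question as a query, returning the minimum third-occurrence index over the table (or -1).
import Mathlib
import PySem

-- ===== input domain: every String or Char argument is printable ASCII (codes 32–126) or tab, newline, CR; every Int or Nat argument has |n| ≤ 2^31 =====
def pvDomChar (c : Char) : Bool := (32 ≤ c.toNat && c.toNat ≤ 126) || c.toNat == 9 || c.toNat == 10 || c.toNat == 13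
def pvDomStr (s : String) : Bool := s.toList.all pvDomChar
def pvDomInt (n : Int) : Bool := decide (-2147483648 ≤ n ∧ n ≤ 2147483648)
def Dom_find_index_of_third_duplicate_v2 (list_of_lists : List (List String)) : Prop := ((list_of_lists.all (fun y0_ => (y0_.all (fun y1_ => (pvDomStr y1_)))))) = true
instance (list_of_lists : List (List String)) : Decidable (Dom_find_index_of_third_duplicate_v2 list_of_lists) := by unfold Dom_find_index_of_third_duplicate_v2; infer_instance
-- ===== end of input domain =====

-- B replaces A's counting dict with an early return by a fully built index
-- table (key -> all occurrence indices) queried afterwards for the minimal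
-- third-occurrence index; alternative decomposition, same asymptotic cost.

-- ===== PORT A =====
-- the loop over enumerate(list_of_lists) with the running counter dict;
-- items are strings here, so the dict branch of the canonicalization never
-- fires and `tuple(... for item in current_list)` is the identity map.
def pvA_loop : List (Int × List String) → PySem.Dict (List String) Int → Int
  | [], _ => -1
  | (index, current_list) :: rest, seen =>
    let current_tuple := current_list.map (fun item => item)
    if seen.contains current_tuple then
      let seen' := seen.insert current_tuple (seen.getD current_tuple 0 + 1)
      if seen'.getD current_tuple 0 == 3 then index
      else pvA_loop rest seen'
    else
      pvA_loop rest (seen.insert current_tuple 1)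

def find_index_of_third_duplicate_v2 (list_of_lists : List (List String)) : Int :=
  pvA_loop (PySem.List.enumerate list_of_lists 0) PySem.Dict.empty

-- ===== PORT B =====
def find_index_of_third_duplicate_v2_alt (list_of_lists : List (List String)) : Int :=
  let positions := (PySem.List.enumerate list_of_lists 0).foldl
    (fun d p => d.modify (p.2.map (fun item => item)) [] (fun v => v ++ [p.1]))
    PySem.Dict.empty
  let cands := (positions.values.filter (fun idx => 3 ≤ idx.length)).map
    (fun idx => idx.getD 2 0)
  match PySem.List.min? cands (fun x => x) with
  | some m => m
  | none => -1

-- ===== PRECONDITION & SPEC =====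
def Spec_find_index_of_third_duplicate_v2 (list_of_lists : List (List String)) (out : Int) : Prop := out = find_index_of_third_duplicate_v2_alt list_of_lists
instance (list_of_lists : List (List String)) (out : Int) : Decidable (Spec_find_index_of_third_duplicate_v2 list_of_lists out) := by unfold Spec_find_index_of_third_duplicate_v2; infer_instance

-- ===== CLAIM (what is proved, stated in full; the proofs are below) =====
def Claim_equal_find_index_of_third_duplicate_v2 : Prop := ∀ (list_of_lists : List (List String)), Dom_find_index_of_third_duplicate_v2 list_of_lists → Spec_find_index_of_third_duplicate_v2 list_of_lists (find_index_of_third_duplicate_v2 list_of_lists)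

-- ===== LEMMAS AND PROOFS =====

-- reference scan: first index whose element already occurred twice before it
def pvG : List (List String) → List (List String) → Int
  | _, [] => -1
  | pre, l :: rest => if pre.count l = 2 then (pre.length : Int) else pvG (pre ++ [l]) rest

-- occurrence indices of key k in a suffix starting at absolute index s
def pvOcc (k : List String) : Int → List (List String) → List Int
  | _, [] => []
  | s, l :: rest => if l == k then s :: pvOcc k (s + 1) rest else pvOcc k (s + 1) rest

theorem pvA_loop_eq_pvG (rest pre : List (List String)) (seen : PySem.Dict (List String) Int)
    (hc : ∀ k, seen.getD k 0 = (pre.count k : Int))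
    (hm : ∀ k, seen.contains k = decide (k ∈ pre)) :
    pvA_loop (PySem.List.enumerate rest (pre.length : Int)) seen = pvG pre rest := by
  induction rest generalizing pre seen with
  | nil => simp [PySem.List.enumerate_nil, pvA_loop, pvG]
  | cons l rest ih =>
    rw [PySem.List.enumerate_cons]
    simp only [pvA_loop, List.map_id', pvG]
    by_cases hmem : l ∈ pre
    · have hcon : seen.contains l = true := by rw [hm]; simp [hmem]
      rw [if_pos hcon]
      have hget : (seen.insert l (seen.getD l 0 + 1)).getD l 0 = (pre.count l : Int) + 1 := by
        rw [PySem.Dict.getD_insert_self, hc]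
      by_cases h2 : pre.count l = 2
      · have : ((seen.insert l (seen.getD l 0 + 1)).getD l 0 == 3) = true := by
          rw [hget, h2]; decide
        rw [if_pos this, if_pos h2]
      · have : ((seen.insert l (seen.getD l 0 + 1)).getD l 0 == 3) = false := by
          rw [hget]
          simp only [beq_eq_false_iff_ne, ne_eq]
          omega
        rw [if_neg (by rw [this]; simp), if_neg h2]
        have := ih (pre ++ [l]) (seen.insert l (seen.getD l 0 + 1))
          (fun k => by
            rw [PySem.Dict.getD_insert]
            by_cases hk : k = l
            · subst hk; rw [if_pos rfl, hc]
              simp [List.count_append]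
            · rw [if_neg hk, hc]
              have h0 : List.count k [l] = 0 := List.count_eq_zero.mpr (by simp [hk])
              simp [List.count_append, h0])
          (fun k => by
            rw [PySem.Dict.contains_insert, hm]
            by_cases hk : k = l
            · subst hk; simp
            · simp [hk])
        simpa using this
    · have hcon : seen.contains l = false := by rw [hm]; simp [hmem]
      rw [if_neg (by simp [hcon])]
      have hc0 : pre.count l = 0 := List.count_eq_zero.mpr hmem
      rw [if_neg (by omega)]
      have := ih (pre ++ [l]) (seen.insert l 1)
        (fun k => by
          rw [PySem.Dict.getD_insert]
          by_cases hk : k = l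
          · subst hk; rw [if_pos rfl]
            simp [List.count_append, hc0]
          · rw [if_neg hk, hc]
            have h0 : List.count k [l] = 0 := List.count_eq_zero.mpr (by simp [hk])
            simp [List.count_append, h0])
        (fun k => by
          rw [PySem.Dict.contains_insert, hm]
          by_cases hk : k = l
          · subst hk; simp
          · simp [hk])
      simpa using this

theorem pvOcc_length (k : List String) (ys : List (List String)) (s : Int) :
    (pvOcc k s ys).length = ys.count k := by
  induction ys generalizing s with
  | nil => simp [pvOcc]
  | cons l rest ih =>
    by_cases h : l == k
    · simp [pvOcc, ih, beq_iff_eq.mp h]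
    · simp [pvOcc, h, ih, List.count_cons]

theorem pvOcc_append (k : List String) (ys zs : List (List String)) (s : Int) :
    pvOcc k s (ys ++ zs) = pvOcc k s ys ++ pvOcc k (s + ys.length) zs := by
  induction ys generalizing s with
  | nil => simp [pvOcc]
  | cons l rest ih =>
    by_cases h : l == k <;>
      simp [pvOcc, h, ih, add_assoc, add_comm 1 (rest.length : Int)]

theorem pvOcc_mem_ge (k : List String) (ys : List (List String)) (s t : Int)
    (h : t ∈ pvOcc k s ys) : s ≤ t := by
  induction ys generalizing s with
  | nil => simp [pvOcc] at h
  | cons l rest ih =>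
    by_cases hl : l == k
    · simp [pvOcc, hl] at h
      rcases h with h | h
      · omega
      · have := ih (s + 1) h; omega
    · simp [pvOcc, hl] at h
      have := ih (s + 1) h; omega

theorem pv_min?_eq_some {m : Int} {ys : List Int} (hmem : m ∈ ys)
    (hmin : ∀ y ∈ ys, m ≤ y) : PySem.List.min? ys (fun x => x) = some m := by
  cases h : PySem.List.min? ys (fun x => x) with
  | none =>
    rw [PySem.List.min?_eq_none_iff] at h
    simp [h] at hmem
  | some m' =>
    have h1 : m' ∈ ys := PySem.List.min?_mem h
    have h2 := PySem.List.min?_isMin h m hmem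
    simp only [] at h2
    have h3 : m ≤ m' := hmin m' h1
    have : m' = m := le_antisymm h2 h3
    rw [this]

theorem pvB_build_getD (ys : List (List String)) (s : Int)
    (d : PySem.Dict (List String) (List Int)) (k : List String) :
    ((PySem.List.enumerate ys s).foldl
        (fun d p => d.modify p.2 [] (fun v => v ++ [p.1])) d).getD k []
      = d.getD k [] ++ pvOcc k s ys := by
  induction ys generalizing s d with
  | nil => simp [PySem.List.enumerate_nil, pvOcc]
  | cons l rest ih =>
    rw [PySem.List.enumerate_cons]
    simp only [List.foldl_cons]
    rw [ih]
    by_cases hk : l == k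
    · have hkk : l = k := beq_iff_eq.mp hk
      subst hkk
      rw [PySem.Dict.getD_modify_self]
      simp [pvOcc, List.append_assoc]
    · have hkk : ¬k = l := fun h => by simp [h] at hk
      rw [PySem.Dict.getD_modify, if_neg hkk]
      simp [pvOcc, hk]

theorem pvB_cands_eq (xs : List (List String)) :
    ((((PySem.List.enumerate xs 0).foldl
        (fun d p => d.modify p.2 [] (fun v => v ++ [p.1]))
        PySem.Dict.empty).values.filter (fun idx => 3 ≤ idx.length)).map
          (fun idx => idx.getD 2 0))
    = ((PySem.Set.ofList xs).filter (fun k => 3 ≤ (pvOcc k 0 xs).length)).map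
        (fun k => (pvOcc k 0 xs).getD 2 0) := by
  have hg : ∀ k, ((PySem.List.enumerate xs 0).foldl
      (fun d p => d.modify p.2 [] (fun v => v ++ [p.1])) PySem.Dict.empty).getD k []
      = pvOcc k 0 xs := by
    intro k; rw [pvB_build_getD]; simp
  have hkeys : ((PySem.List.enumerate xs 0).foldl
      (fun d p => d.modify p.2 [] (fun v => v ++ [p.1])) PySem.Dict.empty).keys
      = PySem.Set.ofList xs := by
    rw [PySem.Dict.keys_foldl_modify_key]
    rw [PySem.List.map_snd_enumerate, PySem.Dict.keys_empty]
    rfl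
  have hnd : ((PySem.List.enumerate xs 0).foldl
      (fun d p => d.modify p.2 [] (fun v => v ++ [p.1])) PySem.Dict.empty).keys.Nodup := by
    rw [hkeys]; exact PySem.Set.nodup_ofList xs
  rw [PySem.Dict.values_eq_map_keys _ hnd ([] : List Int), hkeys]
  rw [List.filter_map, List.map_map]
  simp only [Function.comp_def, hg]

theorem pv_getD2 (U V : List Int) (m : Int) (h : U.length = 2) :
    (U ++ m :: V).getD 2 0 = m := by
  match U, h with
  | [a, b], _ => simp

theorem pv_third_ge (pre tail : List (List String)) (k : List String)
    (hc : pre.count k ≤ 2) (hlen : 3 ≤ (pvOcc k 0 (pre ++ tail)).length) :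
    (pre.length : Int) ≤ (pvOcc k 0 (pre ++ tail)).getD 2 0 := by
  rw [pvOcc_append] at *
  simp only [zero_add] at *
  have hU : (pvOcc k 0 pre).length = pre.count k := pvOcc_length k pre 0
  have hlt : 2 - (pvOcc k 0 pre).length < (pvOcc k (pre.length : Int) tail).length := by
    rw [List.length_append] at hlen; omega
  rw [List.getD_eq_getElem?_getD, List.getElem?_append_right (by omega),
    List.getElem?_eq_getElem hlt]
  simp only [Option.getD_some]
  exact pvOcc_mem_ge k tail (pre.length : Int) _ (List.getElem_mem hlt)

theorem pv_alt_eq_pvG (xs : List (List String)) (rest pre : List (List String))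
    (hsplit : pre ++ rest = xs) (hb : ∀ k, pre.count k ≤ 2) :
    find_index_of_third_duplicate_v2_alt xs = pvG pre rest := by
  induction rest generalizing pre with
  | nil =>
    have hxs : pre = xs := by simpa using hsplit
    subst hxs
    have hnil : (PySem.Set.ofList pre).filter (fun k => 3 ≤ (pvOcc k 0 pre).length) = [] := by
      apply List.filter_eq_nil_iff.mpr
      intro k _
      have := pvOcc_length k pre 0
      have := hb k
      simp only [decide_eq_true_eq]
      omega
    simp only [find_index_of_third_duplicate_v2_alt, List.map_id']
    rw [pvB_cands_eq, hnil]
    rw [show PySem.List.min? (List.map (fun k => (pvOcc k 0 pre).getD 2 0) []) (fun x => x)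
        = none from (PySem.List.min?_eq_none_iff _ _).mpr rfl]
    simp [pvG]
  | cons l rest ih =>
    have hx : xs = pre ++ l :: rest := hsplit.symm
    simp only [pvG]
    by_cases h2 : pre.count l = 2
    · rw [if_pos h2]
      have hlenl : 3 ≤ (pvOcc l 0 xs).length := by
        rw [pvOcc_length, hx, List.count_append, List.count_cons_self]
        omega
      have hval : (pvOcc l 0 xs).getD 2 0 = (pre.length : Int) := by
        rw [hx, pvOcc_append]
        simp only [zero_add]
        have hcons : pvOcc l (pre.length : Int) (l :: rest)
            = (pre.length : Int) :: pvOcc l ((pre.length : Int) + 1) rest := by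
          simp [pvOcc]
        rw [hcons]
        exact pv_getD2 _ _ _ (by rw [pvOcc_length, h2])
      have hmem : (pre.length : Int) ∈ ((PySem.Set.ofList xs).filter
            (fun k => 3 ≤ (pvOcc k 0 xs).length)).map (fun k => (pvOcc k 0 xs).getD 2 0) := by
        rw [← hval]
        apply List.mem_map_of_mem
        apply List.mem_filter.mpr
        refine ⟨(PySem.Set.mem_ofList _ _).mpr (by rw [hx]; simp), by simpa using hlenl⟩
      have hlb : ∀ y ∈ ((PySem.Set.ofList xs).filter
            (fun k => 3 ≤ (pvOcc k 0 xs).length)).map (fun k => (pvOcc k 0 xs).getD 2 0),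
          (pre.length : Int) ≤ y := by
        intro y hy
        obtain ⟨k, hk, rfl⟩ := List.mem_map.mp hy
        have hk2 := (List.mem_filter.mp hk).2
        simp only [decide_eq_true_eq] at hk2
        have := pv_third_ge pre (l :: rest) k (hb k) (by rw [← hx]; exact hk2)
        rw [← hx] at this
        exact this
      have hmin := pv_min?_eq_some hmem hlb
      simp only [find_index_of_third_duplicate_v2_alt, List.map_id']
      rw [pvB_cands_eq, hmin]
    · rw [if_neg h2]
      apply ih (pre ++ [l])
      · rw [List.append_assoc]; simpa using hsplit
      · intro k
        by_cases hk : k = l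
        · subst hk
          rw [List.count_append]
          have h1 : List.count k [k] = 1 := by simp
          have := hb k
          omega
        · have h0 : List.count k [l] = 0 := List.count_eq_zero.mpr (by simp [hk])
          rw [List.count_append, h0]
          simpa using hb k

-- ===== VERDICT (by name: the statement is the Claim_ definition above) =====
theorem find_index_of_third_duplicate_v2_spec : Claim_equal_find_index_of_third_duplicate_v2 := by
  intro xs _
  unfold Spec_find_index_of_third_duplicate_v2
  have hA : find_index_of_third_duplicate_v2 xs = pvG [] xs := by
    unfold find_index_of_third_duplicate_v2
    simpa using pvA_loop_eq_pvG xs [] PySem.Dict.empty (by simp) (by simp)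
  have hB : find_index_of_third_duplicate_v2_alt xs = pvG [] xs :=
    pv_alt_eq_pvG xs xs [] rfl (by simp)
  rw [hA, hB]
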